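-- pv_equiv track=rewrite | github.com/pushpakjalan02/GeeksForGeeks-Solutions | Rotation_With_Maximum_Hamming_Distance.py | max_hamming_distance
-- ===== SOURCE A (Python) =====
-- def max_hamming_distance(list_of_nos, nos):
--     max = -1
--     sum = 0
--     for i in range(0, nos):
--         for j in range(0, nos):
--             if(list_of_nos[j] != list_of_nos[(i + j) % nos]):
--                 sum += 1
--         if(max < sum):
--             max = sum
--         sum = 0
--     return max
-- ===== SOURCE B (Python) =====
-- def max_hamming_distance(list_of_nos, nos):
--     if nos <= 0:
--         return -1
--     pos = {}
--     for i in range(nos):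
--         pos.setdefault(list_of_nos[i], []).append(i)
--     matches = [0] * nos
--     for group in pos.values():
--         for a in group:
--             for b in group:
--                 matches[(b - a) % nos] += 1
--     return nos - min(matches)
-- ===== Notes on version B (the rewrite author's own statement) =====
-- stated objective: faster
-- what changed: Instead of rescanning the whole list for every rotation, B groups the positions of each value in one dict pass and bins every equal-value position pair (a,b) into a per-shift match table at (b-a) % nos, returning nos minus the smallest match count.
import Mathlib
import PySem

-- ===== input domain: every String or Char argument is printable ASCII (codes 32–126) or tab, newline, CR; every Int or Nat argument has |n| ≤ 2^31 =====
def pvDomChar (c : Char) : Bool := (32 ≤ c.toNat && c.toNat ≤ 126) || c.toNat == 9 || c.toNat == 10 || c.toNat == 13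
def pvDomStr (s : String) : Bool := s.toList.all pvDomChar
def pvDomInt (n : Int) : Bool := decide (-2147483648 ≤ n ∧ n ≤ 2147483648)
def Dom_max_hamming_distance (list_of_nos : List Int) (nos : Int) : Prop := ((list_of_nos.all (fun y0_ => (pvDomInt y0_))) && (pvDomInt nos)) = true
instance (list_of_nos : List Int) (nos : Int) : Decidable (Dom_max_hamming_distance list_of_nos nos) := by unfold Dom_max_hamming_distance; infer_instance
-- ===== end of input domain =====

-- B replaces A's per-shift full rescan by one pass that groups equal values' positions
-- in a dict and bins each equal-value position pair into a per-shift match table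
-- (objective: faster on value-diverse inputs; exact same results).
-- ===== PORT A =====
def max_hamming_distance (list_of_nos : List Int) (nos : Int) : Int :=
  (PySem.List.pyRange 0 nos 1).foldl (fun mx i =>
    let s := (PySem.List.pyRange 0 nos 1).foldl (fun s j =>
      if PySem.List.pyGetD list_of_nos j 0 ≠
         PySem.List.pyGetD list_of_nos (PySem.Int.mod (i + j) nos) 0 then s + 1 else s) 0
    if mx < s then s else mx) (-1)

-- ===== PORT B =====
def max_hamming_distance_alt (list_of_nos : List Int) (nos : Int) : Int :=
  if nos ≤ 0 then -1
  else
    let pos : PySem.Dict Int (List Int) :=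
      (PySem.List.pyRange 0 nos 1).foldl
        (fun d i => d.modify (PySem.List.pyGetD list_of_nos i 0) [] (fun P => P ++ [i]))
        PySem.Dict.empty
    let tbl : List Int :=
      pos.values.foldl
        (fun ms P => P.foldl (fun ms a => P.foldl
            (fun ms b =>
              PySem.List.pySetD ms (PySem.Int.mod (b - a) nos)
                (PySem.List.pyGetD ms (PySem.Int.mod (b - a) nos) 0 + 1)) ms) ms)
        (List.replicate nos.toNat 0)
    nos - (PySem.List.min? tbl (fun x => x)).getD 0

-- ===== PRECONDITION & SPEC =====
-- Pre_ excludes exactly the inputs where the Python programs raise IndexError: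
-- 0 < nos and list_of_nos shorter than nos (both A and B index positions 0..nos-1).
def Pre_max_hamming_distance (list_of_nos : List Int) (nos : Int) : Prop :=
  nos ≤ 0 ∨ nos ≤ (list_of_nos.length : Int)
instance (list_of_nos : List Int) (nos : Int) :
    Decidable (Pre_max_hamming_distance list_of_nos nos) := by
  unfold Pre_max_hamming_distance; infer_instance
def pvWitness_max_hamming_distance : List Int × Int := ([1, 2, 1], 3)
def Spec_max_hamming_distance (list_of_nos : List Int) (nos : Int) (out : Int) : Prop :=
  out = max_hamming_distance_alt list_of_nos nos
instance (list_of_nos : List Int) (nos : Int) (out : Int) :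
    Decidable (Spec_max_hamming_distance list_of_nos nos out) := by
  unfold Spec_max_hamming_distance; infer_instance

-- ===== CLAIM (what is proved, stated in full; the proofs are below) =====
def Claim_equal_max_hamming_distance : Prop := ∀ (list_of_nos : List Int) (nos : Int), Dom_max_hamming_distance list_of_nos nos → Pre_max_hamming_distance list_of_nos nos → Spec_max_hamming_distance list_of_nos nos (max_hamming_distance list_of_nos nos)

-- ===== LEMMAS AND PROOFS =====

def pvG (l : List Int) (j : Nat) : Int := l.getD j 0
def pvSh (n a b : Nat) : Nat := (b + n - a) % n
def pvC (l : List Int) (n s : Nat) : Nat :=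
  ∑ a ∈ Finset.range n, ∑ b ∈ Finset.range n,
    (if pvG l a = pvG l b ∧ pvSh n a b = s then 1 else 0)

def pvDict (l : List Int) (n : Nat) : PySem.Dict Int (List Int) :=
  (List.range n).foldl
    (fun d i => d.modify (pvG l i) [] (fun P => P ++ [(i : Int)])) PySem.Dict.empty

def pvRv (l : List Int) (n : Nat) (v : Int) : List Nat :=
  (List.range n).filter (fun i => pvG l i == v)

def pvSlots (l : List Int) (n : Nat) : List Int :=
  (pvDict l n).values.flatMap
    (fun P => P.flatMap (fun a => P.map (fun b => PySem.Int.mod (b - a) (n : Int))))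

def pvM (l : List Int) (n i : Nat) : Nat :=
  (List.range n).countP (fun j => pvG l j == pvG l ((i + j) % n))

lemma pvA_norm (l : List Int) (n : Nat) :
    max_hamming_distance l (n : Int)
      = (List.range n).foldl (fun m i => max m ((n : Int) - (pvM l n i : Int))) (-1) := by
  unfold max_hamming_distance
  simp only [PySem.List.pyRange_zero_natCast, List.foldl_map, ← Nat.cast_add,
    PySem.Int.mod_natCast, PySem.List.pyGetD_natCast]
  have hstep : (fun (mx : Int) (i : Nat) =>
      let s := (List.range n).foldl (fun s j =>
        if l.getD j 0 ≠ l.getD ((i + j) % n) 0 then s + 1 else s) 0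
      if mx < s then s else mx)
      = (fun m i => max m ((n : Int) - (pvM l n i : Int))) := by
    funext mx i
    have hfun : (fun (s : Int) (j : Nat) => if l.getD j 0 ≠ l.getD ((i + j) % n) 0 then s + 1 else s)
        = (fun s j => if (fun j => !(pvG l j == pvG l ((i + j) % n))) j = true then s + 1 else s) := by
      funext s j
      simp [pvG]
    rw [hfun, PySem.List.foldl_count_if]
    have hc := List.length_eq_countP_add_countP (l := List.range n)
      (p := fun j => pvG l j == pvG l ((i + j) % n))
    simp only [List.length_range] at hc
    have hM : pvM l n i = (List.range n).countP (fun j => pvG l j == pvG l ((i + j) % n)) := rfl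
    have hc2 : List.countP (fun j => !(pvG l j == pvG l ((i + j) % n))) (List.range n)
        = List.countP (fun a => decide (¬((pvG l a == pvG l ((i + a) % n)) = true))) (List.range n) := by
      apply List.countP_congr
      intro a _
      simp
    simp only []
    omega
  rw [hstep]

lemma pvCountP_range_sum (p : Nat → Bool) (n : Nat) :
    ((List.range n).countP p : Nat) = ∑ j ∈ Finset.range n, if p j then 1 else 0 := by
  induction n with
  | zero => simp
  | succ m ih =>
    rw [List.range_succ, List.countP_append, Finset.sum_range_succ, ih]
    simp [List.countP_cons]


lemma pvSh_solve {n a b s : Nat} (_hn : 0 < n) (hb : b < n) (hs : pvSh n a b = s)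
    (ha : a < n) : b = (a + s) % n := by
  subst hs
  unfold pvSh
  rw [Nat.add_mod_mod]
  have h2 : a + (b + n - a) = b + n := by omega
  rw [h2, Nat.add_mod_right, Nat.mod_eq_of_lt hb]

lemma pvSh_back {n a s : Nat} (hn : 0 < n) (ha : a < n) (hs : s < n) :
    pvSh n a ((a + s) % n) = s := by
  have hbn : (a + s) % n < n := Nat.mod_lt _ hn
  have h1 : (a + s) % n = (a + pvSh n a ((a + s) % n)) % n :=
    pvSh_solve hn hbn rfl ha
  have h2 : (a + s) % n = (a + s % n) % n := by rw [Nat.add_mod_mod]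
  have hsh : pvSh n a ((a + s) % n) < n := Nat.mod_lt _ hn
  -- cancel a modulo n
  have : (a + s) ≡ (a + pvSh n a ((a + s) % n)) [MOD n] := by
    unfold Nat.ModEq
    rw [← h1]
  have hcan : s ≡ pvSh n a ((a + s) % n) [MOD n] := Nat.ModEq.add_left_cancel' a this
  have := hcan.eq_of_lt_of_lt hs hsh
  omega
lemma pvC_eq_pvM (l : List Int) (n : Nat) (hn : 0 < n) {s : Nat} (hs : s < n) :
    pvC l n s = pvM l n s := by
  unfold pvC pvM
  rw [pvCountP_range_sum]
  apply Finset.sum_congr rfl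
  intro a ha
  rw [Finset.mem_range] at ha
  rw [Finset.sum_eq_single ((a + s) % n)]
  · have hco : (s + a) % n = (a + s) % n := by rw [Nat.add_comm]
    have hb := pvSh_back hn ha hs
    rw [hco]
    by_cases h : pvG l a = pvG l ((a + s) % n) <;> simp [h, hb]
  · intro b hb hne
    rw [Finset.mem_range] at hb
    rw [if_neg]
    rintro ⟨-, hsh⟩
    exact hne (pvSh_solve hn hb hsh ha)
  · intro hmem
    exact absurd (Finset.mem_range.mpr (Nat.mod_lt _ hn)) hmem

lemma pvM_zero (l : List Int) (n : Nat) : pvM l n 0 = n := by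
  unfold pvM
  have : ∀ j ∈ List.range n, (pvG l j == pvG l ((0 + j) % n)) = true := by
    intro j hj
    rw [List.mem_range] at hj
    simp [Nat.mod_eq_of_lt hj]
  calc (List.range n).countP _ = (List.range n).length := List.countP_eq_length.mpr this
    _ = n := List.length_range

lemma pvDict_getD (l : List Int) (n : Nat) (v : Int) :
    (pvDict l n).getD v [] = (pvRv l n v).map (fun i : Nat => (i : Int)) := by
  unfold pvDict pvRv
  have hm : (List.range n).foldl
        (fun (d : PySem.Dict Int (List Int)) (i : Nat) =>
          d.modify (pvG l i) [] (fun P => P ++ [(i : Int)])) PySem.Dict.empty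
      = ((List.range n).map (fun i : Nat => (pvG l i, (i : Int)))).foldl
          (fun d p => d.modify p.1 [] (fun x => x ++ [p.2])) PySem.Dict.empty := by
    rw [List.foldl_map]
  rw [hm]
  rw [PySem.Dict.getD_foldl_modify_append]
  rw [PySem.Dict.getD_empty, List.nil_append, List.filter_map, List.map_map]
  simp [Function.comp_def]

lemma pvDict_keys_nodup (l : List Int) (n : Nat) : (pvDict l n).keys.Nodup := by
  unfold pvDict
  exact PySem.Dict.nodup_keys_foldl_modify_key _ (fun i => pvG l i) _
    (fun _ i => fun P => P ++ [(i : Int)]) _ PySem.Dict.nodup_keys_empty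

lemma pvDict_mem_keys (l : List Int) (n : Nat) (v : Int) :
    v ∈ (pvDict l n).keys ↔ ∃ i ∈ List.range n, pvG l i = v := by
  unfold pvDict
  rw [PySem.Dict.keys_foldl_modify_key _ (fun i => pvG l i) _
    (fun _ i => fun P => P ++ [(i : Int)])]
  rw [PySem.Dict.keys_empty]
  rw [PySem.Set.mem_update]
  simp [eq_comm]

lemma pvDict_values (l : List Int) (n : Nat) :
    (pvDict l n).values
      = (pvDict l n).keys.map (fun v => (pvRv l n v).map (fun i : Nat => (i : Int))) := by
  rw [PySem.Dict.values_eq_map_keys _ (pvDict_keys_nodup l n) []]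
  exact List.map_congr_left (fun v _ => pvDict_getD l n v)

lemma pvNested_eq_slots (l : List Int) (n : Nat) (ms : List Int) :
    (pvDict l n).values.foldl
        (fun ms P => P.foldl (fun ms a => P.foldl
            (fun ms b =>
              PySem.List.pySetD ms (PySem.Int.mod (b - a) (n : Int))
                (PySem.List.pyGetD ms (PySem.Int.mod (b - a) (n : Int)) 0 + 1)) ms) ms) ms
      = (pvSlots l n).foldl
          (fun ms t => PySem.List.pySetD ms t (PySem.List.pyGetD ms t 0 + 1)) ms := by
  unfold pvSlots
  rw [List.foldl_flatMap]
  have hfun : (fun (ms : List Int) (P : List Int) => P.foldl (fun ms a => P.foldl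
        (fun ms b =>
          PySem.List.pySetD ms (PySem.Int.mod (b - a) (n : Int))
            (PySem.List.pyGetD ms (PySem.Int.mod (b - a) (n : Int)) 0 + 1)) ms) ms)
      = (fun acc P => (P.flatMap (fun a => P.map (fun b => PySem.Int.mod (b - a) (n : Int)))).foldl
          (fun ms t => PySem.List.pySetD ms t (PySem.List.pyGetD ms t 0 + 1)) acc) := by
    funext acc P
    rw [List.foldl_flatMap]
    have hin : (fun (ms : List Int) (a : Int) => P.foldl
          (fun ms b =>
            PySem.List.pySetD ms (PySem.Int.mod (b - a) (n : Int))
              (PySem.List.pyGetD ms (PySem.Int.mod (b - a) (n : Int)) 0 + 1)) ms)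
        = (fun ms a => (P.map (fun b => PySem.Int.mod (b - a) (n : Int))).foldl
            (fun ms t => PySem.List.pySetD ms t (PySem.List.pyGetD ms t 0 + 1)) ms) := by
      funext ms a
      rw [List.foldl_map]
    rw [hin]
  rw [hfun]

lemma pvCount_flatMap {α : Type} (L : List α) (f : α → List Int) (x : Int) :
    (L.flatMap f).count x = (L.map (fun u => (f u).count x)).sum := by
  induction L with
  | nil => rfl
  | cons a L ih => rw [List.flatMap_cons, List.count_append, List.map_cons, List.sum_cons, ih]

lemma pvSlot_natCast (n a b : Nat) (hn : 0 < n) (ha : a ≤ n) :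
    PySem.Int.mod ((b : Int) - (a : Int)) (n : Int) = ((pvSh n a b : Nat) : Int) := by
  have h1 : (b : Int) - (a : Int) = ((b + n - a : Nat) : Int) - (n : Int) := by
    have : a ≤ b + n := by omega
    push_cast [Nat.cast_sub this]
    ring
  rw [h1, PySem.Int.mod_eq_emod_of_pos (by exact_mod_cast hn), Int.sub_emod_right,
    ← PySem.Int.mod_eq_emod_of_pos (by exact_mod_cast hn : (0:Int) < (n:Int)),
    PySem.Int.mod_natCast]
  rfl

lemma pvSum_filter_range (p : Nat → Bool) (F : Nat → Nat) (n : Nat) :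
    (((List.range n).filter p).map F).sum = ∑ a ∈ Finset.range n, if p a then F a else 0 := by
  induction n with
  | zero => simp
  | succ m ih =>
    rw [List.range_succ, List.filter_append, List.map_append, List.sum_append,
      Finset.sum_range_succ, ih]
    by_cases h : p m <;> simp [h]

lemma pvCountP_filter_range (p q : Nat → Bool) (n : Nat) :
    ((List.range n).filter p).countP q = ∑ b ∈ Finset.range n, if p b ∧ q b then 1 else 0 := by
  rw [List.countP_filter, pvCountP_range_sum]
  apply Finset.sum_congr rfl
  intro b _
  by_cases h1 : p b <;> by_cases h2 : q b <;> simp [h1, h2]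

lemma pvGroup_count (l : List Int) (n : Nat) (hn : 0 < n) (v : Int) (s : Nat) :
    (((pvRv l n v).map (fun i : Nat => (i : Int))).flatMap
        (fun a => ((pvRv l n v).map (fun i : Nat => (i : Int))).map
          (fun b => PySem.Int.mod (b - a) (n : Int)))).count ((s : Nat) : Int)
      = ∑ a ∈ Finset.range n, ∑ b ∈ Finset.range n,
          (if pvG l a = v ∧ pvG l b = v ∧ pvSh n a b = s then 1 else 0) := by
  rw [pvCount_flatMap, List.map_map]
  have hstep : ∀ x ∈ pvRv l n v,
      ((fun u => ((((pvRv l n v).map (fun i : Nat => (i : Int))).map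
          (fun b => PySem.Int.mod (b - u) (n : Int))).count ((s : Nat) : Int)))
        ∘ (fun i : Nat => (i : Int))) x
      = (fun a => (pvRv l n v).countP (fun b => pvSh n a b == s)) x := by
    intro a haRv
    have ha : a < n := List.mem_range.mp (List.mem_of_mem_filter haRv)
    simp only [Function.comp_def]
    rw [List.map_map, List.count_eq_countP, List.countP_map]
    apply List.countP_congr
    intro b hbRv
    have hb : b < n := List.mem_range.mp (List.mem_of_mem_filter hbRv)
    simp only [Function.comp_def, pvSlot_natCast n a b hn ha.le]
    by_cases h : pvSh n a b = s <;> simp [h]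
  rw [List.map_congr_left hstep]
  unfold pvRv
  rw [pvSum_filter_range]
  apply Finset.sum_congr rfl
  intro a _
  by_cases hv : pvG l a = v
  · rw [if_pos (by simp [hv])]
    rw [pvCountP_filter_range]
    apply Finset.sum_congr rfl
    intro b _
    by_cases h1 : pvG l b = v <;> by_cases h2 : pvSh n a b = s <;>
      simp [h1, h2, hv]
  · rw [if_neg (by simp [hv])]
    symm
    apply Finset.sum_eq_zero
    intro b _
    rw [if_neg]
    rintro ⟨h, -⟩
    exact hv h

lemma pvSlots_count (l : List Int) (n : Nat) (hn : 0 < n) (s : Nat) :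
    (pvSlots l n).count ((s : Nat) : Int) = pvC l n s := by
  unfold pvSlots
  rw [pvDict_values, List.flatMap_map, pvCount_flatMap]
  have hstep : ∀ v ∈ (pvDict l n).keys,
      (fun v => ((((pvRv l n v).map (fun i : Nat => (i : Int))).flatMap
          (fun a => ((pvRv l n v).map (fun i : Nat => (i : Int))).map
            (fun b => PySem.Int.mod (b - a) (n : Int)))).count ((s : Nat) : Int))) v
      = (fun v => ∑ a ∈ Finset.range n, ∑ b ∈ Finset.range n,
          (if pvG l a = v ∧ pvG l b = v ∧ pvSh n a b = s then 1 else 0)) v := by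
    intro v _
    exact pvGroup_count l n hn v s
  rw [List.map_congr_left hstep]
  rw [← List.sum_toFinset _ (pvDict_keys_nodup l n)]
  rw [Finset.sum_comm]
  unfold pvC
  apply Finset.sum_congr rfl
  intro a haF
  have ha : a < n := Finset.mem_range.mp haF
  rw [Finset.sum_comm]
  apply Finset.sum_congr rfl
  intro b _
  have hrw : ∀ v, (if pvG l a = v ∧ pvG l b = v ∧ pvSh n a b = s then 1 else 0)
      = (if pvG l a = v then (if pvG l a = pvG l b ∧ pvSh n a b = s then 1 else 0) else 0) := by
    intro v
    by_cases h1 : pvG l a = v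
    · subst h1
      by_cases h2 : pvG l a = pvG l b ∧ pvSh n a b = s
      · rw [if_pos ⟨rfl, h2.1.symm, h2.2⟩, if_pos rfl, if_pos h2]
      · rw [if_pos rfl, if_neg h2, if_neg]
        rintro ⟨-, hb, hsh⟩
        exact h2 ⟨hb.symm, hsh⟩
    · rw [if_neg (fun hc => h1 hc.1), if_neg h1]
  simp only [hrw]
  rw [Finset.sum_ite_eq]
  rw [if_pos]
  rw [List.mem_toFinset]
  exact (pvDict_mem_keys l n (pvG l a)).mpr ⟨a, List.mem_range.mpr ha, rfl⟩

-- bump-fold lemmas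

lemma pvBump_length (S : List Int) (ms : List Int) :
    (S.foldl (fun ms t => PySem.List.pySetD ms t (PySem.List.pyGetD ms t 0 + 1)) ms).length
      = ms.length := by
  induction S generalizing ms with
  | nil => rfl
  | cons t S ih => rw [List.foldl_cons, ih, PySem.List.length_pySetD]

lemma pvBump_getD (S : List Int) (ms : List Int)
    (hS : ∀ t ∈ S, 0 ≤ t ∧ t < (ms.length : Int)) (k : Nat) :
    PySem.List.pyGetD
        (S.foldl (fun ms t => PySem.List.pySetD ms t (PySem.List.pyGetD ms t 0 + 1)) ms) (k : Int) 0
      = PySem.List.pyGetD ms (k : Int) 0 + S.count (k : Int) := by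
  induction S generalizing ms with
  | nil => simp
  | cons t S ih =>
    obtain ⟨ht0, htl⟩ := hS t List.mem_cons_self
    have htn : t = ((t.toNat : Nat) : Int) := by omega
    have htlt : t.toNat < ms.length := by omega
    rw [List.foldl_cons, ih _ (by
      intro u hu
      have := hS u (List.mem_cons_of_mem _ hu)
      rwa [PySem.List.length_pySetD])]
    rw [htn, PySem.List.pyGetD_pySetD_natCast _ _ _ _ _ htlt]
    have hcnt : List.count ((k : Nat) : Int) (((t.toNat : Nat) : Int) :: S)
        = List.count ((k : Nat) : Int) S + (if k = t.toNat then 1 else 0) := by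
      rw [List.count_cons]
      congr 1
      by_cases h : k = t.toNat
      · have hb : ((((t.toNat : Nat) : Int)) == ((k : Nat) : Int)) = true := by
          simp only [beq_iff_eq]; omega
        rw [hb, if_pos rfl, if_pos h]
      · have hb : ((((t.toNat : Nat) : Int)) == ((k : Nat) : Int)) = false := by
          simp only [beq_eq_false_iff_ne, ne_eq]
          omega
        rw [hb, if_neg h]
        simp
    rw [hcnt]
    by_cases hk : k = t.toNat
    · rw [if_pos hk, hk]
      push_cast
      omega
    · rw [if_neg hk, if_neg hk]
      push_cast
      omega

lemma pvSlots_bounds (l : List Int) (n : Nat) (hn : 0 < n) :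
    ∀ t ∈ pvSlots l n, 0 ≤ t ∧ t < ((n : Nat) : Int) := by
  intro t ht
  unfold pvSlots at ht
  rw [List.mem_flatMap] at ht
  obtain ⟨P, -, hP⟩ := ht
  rw [List.mem_flatMap] at hP
  obtain ⟨a, -, hab⟩ := hP
  rw [List.mem_map] at hab
  obtain ⟨b, -, rfl⟩ := hab
  have hpos : (0 : Int) < ((n : Nat) : Int) := by exact_mod_cast hn
  exact ⟨PySem.Int.mod_nonneg _ hpos, PySem.Int.mod_lt _ hpos⟩

lemma pvTbl_eq (l : List Int) (n : Nat) (hn : 0 < n) :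
    (pvSlots l n).foldl
        (fun ms t => PySem.List.pySetD ms t (PySem.List.pyGetD ms t 0 + 1))
        (List.replicate n (0 : Int))
      = (List.range n).map (fun s => (pvC l n s : Int)) := by
  have hlen : ((pvSlots l n).foldl
      (fun ms t => PySem.List.pySetD ms t (PySem.List.pyGetD ms t 0 + 1))
      (List.replicate n (0 : Int))).length = n := by
    rw [pvBump_length, List.length_replicate]
  apply List.ext_getElem
  · rw [hlen, List.length_map, List.length_range]
  intro k hk1 hk2
  have hkn : k < n := by rwa [hlen] at hk1
  have hgd := pvBump_getD (pvSlots l n) (List.replicate n (0 : Int))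
    (by
      intro t ht
      have := pvSlots_bounds l n hn t ht
      rwa [List.length_replicate]) k
  rw [PySem.List.pyGetD_natCast, PySem.List.pyGetD_natCast] at hgd
  rw [List.getD_eq_getElem _ _ hk1] at hgd
  rw [List.getD_eq_getElem _ _ (by rwa [List.length_replicate])] at hgd
  rw [List.getElem_replicate] at hgd
  rw [pvSlots_count l n hn k] at hgd
  rw [hgd, List.getElem_map, List.getElem_range]
  omega

lemma pvB_norm (l : List Int) (n : Nat) (hn : 0 < n) :
    max_hamming_distance_alt l ((n : Nat) : Int)
      = ((n : Nat) : Int)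
        - (PySem.List.min? ((List.range n).map (fun s => (pvC l n s : Int)))
            (fun x => x)).getD 0 := by
  unfold max_hamming_distance_alt
  rw [if_neg (by exact_mod_cast Nat.not_le.mpr hn : ¬ ((n : Nat) : Int) ≤ 0)]
  have hpos : (PySem.List.pyRange 0 ((n : Nat) : Int) 1).foldl
      (fun d i => d.modify (PySem.List.pyGetD l i 0) [] (fun P => P ++ [i]))
      PySem.Dict.empty = pvDict l n := by
    unfold pvDict pvG
    rw [PySem.List.pyRange_zero_natCast, List.foldl_map]
    simp only [PySem.List.pyGetD_natCast]
  rw [hpos]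
  have htoNat : (((n : Nat) : Int)).toNat = n := by omega
  rw [htoNat]
  show ((n : Nat) : Int)
      - (PySem.List.min?
          ((pvDict l n).values.foldl
            (fun ms P => P.foldl (fun ms a => P.foldl
                (fun ms b =>
                  PySem.List.pySetD ms (PySem.Int.mod (b - a) ((n : Nat) : Int))
                    (PySem.List.pyGetD ms (PySem.Int.mod (b - a) ((n : Nat) : Int)) 0 + 1)) ms) ms)
            (List.replicate n (0 : Int)))
          (fun x => x)).getD 0 = _
  rw [pvNested_eq_slots l n (List.replicate n (0 : Int))]
  rw [pvTbl_eq l n hn]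

lemma pvFoldMaxMin (A : Int) (t : List Nat) (c : Nat → Int) (acc : Int) :
    t.foldl (fun m i => max m (A - c i)) (A - acc)
      = A - t.foldl (fun m i => min m (c i)) acc := by
  induction t generalizing acc with
  | nil => simp
  | cons x t ih =>
    rw [List.foldl_cons, List.foldl_cons]
    have h : max (A - acc) (A - c x) = A - min acc (c x) := by omega
    rw [h, ih]

lemma pvFinal (n : Nat) (hn : 0 < n) (c : Nat → Int) (hc0 : c 0 = (n : Int)) :
    (List.range n).foldl (fun m i => max m ((n : Int) - c i)) (-1)
      = (n : Int) - (PySem.List.min? ((List.range n).map c) (fun x => x)).getD 0 := by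
  obtain ⟨m, rfl⟩ : ∃ m, n = m + 1 := ⟨n - 1, by omega⟩
  rw [List.range_succ_eq_map, List.foldl_cons, List.map_cons, PySem.List.min?_id_cons,
    Option.getD_some, List.foldl_map]
  have h0 : max (-1) (((m + 1 : Nat) : Int) - c 0) = ((m + 1 : Nat) : Int) - c 0 := by
    rw [hc0]; omega
  rw [h0, List.map_map, List.foldl_map]
  exact pvFoldMaxMin _ _ (fun y => c y.succ) _

lemma pvMain (l : List Int) (nos : Int) :
    max_hamming_distance l nos = max_hamming_distance_alt l nos := by
  by_cases h : nos ≤ 0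
  · unfold max_hamming_distance max_hamming_distance_alt
    rw [PySem.List.pyRange_one_eq_nil h, if_pos h]
    rfl
  · obtain ⟨n, rfl⟩ : ∃ n : Nat, nos = ((n : Nat) : Int) := ⟨nos.toNat, by omega⟩
    have hn : 0 < n := by omega
    rw [pvA_norm l n, pvB_norm l n hn]
    rw [pvFinal n hn (fun i => (pvM l n i : Int)) (by simp [pvM_zero])]
    have hmap : (List.range n).map (fun s => (pvC l n s : Int))
        = (List.range n).map (fun i => (pvM l n i : Int)) := by
      apply List.map_congr_left
      intro s hs
      rw [pvC_eq_pvM l n hn (List.mem_range.mp hs)]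
    rw [hmap]

-- ===== VERDICT (by name: the statement is the Claim_ definition above) =====
theorem max_hamming_distance_spec : Claim_equal_max_hamming_distance := by
  intro list_of_nos nos _ _
  unfold Spec_max_hamming_distance
  exact pvMain list_of_nos nos
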